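-- pv_equiv track=rewrite | github.com/militsasotirova/cs6850-wiki | src.py | find_first_link_target
-- ===== SOURCE A (Python) =====
-- def find_first_link_target(text, link_offsets, target_page_ids):
--     in_parens = False
--     for i in range(len(text)):
--         if text[i] == '(':
--             in_parens = True
--
--         elif text[i] == ')':
--             in_parens = False
--
--         elif not in_parens and i in link_offsets:
--             index = link_offsets.index(i)
--             return target_page_ids[index]
--
--     return None
-- ===== SOURCE B (Python) =====
-- def find_first_link_target(text, link_offsets, target_page_ids):
--     n = len(text)
--     qualifying = [i for i in sorted(set(link_offsets))
--                   if 0 <= i < n and text[i] not in '()'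
--                   and text.rfind('(', 0, i) <= text.rfind(')', 0, i)]
--     if qualifying:
--         return target_page_ids[link_offsets.index(qualifying[0])]
--     return None
-- ===== Notes on version B (the rewrite author's own statement) =====
-- stated objective: alternative
-- what changed: Replaces A's stateful left-to-right character scan (toggling an in_parens flag and testing membership at every index) by an offset-driven query: sort the distinct link offsets, keep those that are in range, not a paren character, and whose paren state (computed by comparing rfind('(') with rfind(')') before the offset) is closed, and return the id of the smallest such offset.
import Mathlib
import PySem

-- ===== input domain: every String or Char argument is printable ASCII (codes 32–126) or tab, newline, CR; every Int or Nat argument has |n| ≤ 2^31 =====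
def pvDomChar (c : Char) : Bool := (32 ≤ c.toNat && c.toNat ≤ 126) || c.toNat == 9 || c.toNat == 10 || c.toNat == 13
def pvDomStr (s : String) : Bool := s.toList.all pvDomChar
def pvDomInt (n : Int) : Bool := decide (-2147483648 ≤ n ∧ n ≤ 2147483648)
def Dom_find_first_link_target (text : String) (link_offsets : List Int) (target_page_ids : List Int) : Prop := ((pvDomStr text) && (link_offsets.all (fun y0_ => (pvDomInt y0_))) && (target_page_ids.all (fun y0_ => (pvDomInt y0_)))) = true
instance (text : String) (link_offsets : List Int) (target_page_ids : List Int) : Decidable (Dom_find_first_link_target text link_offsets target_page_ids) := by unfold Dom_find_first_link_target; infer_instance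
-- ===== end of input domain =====

-- B replaces A's stateful left-to-right character scan by a sorted-offset query loop
-- (objective: alternative decomposition, same exact result; no speed claim).

-- ===== PORT A =====
-- A's "for i in range(len(text))" loop: structural recursion over the characters,
-- carrying the running index i and the in_parens flag; the early return becomes a returned value.
def pvGoA (offs ids : List Int) : List Char → Int → Bool → Option Int
  | [], _, _ => none
  | c :: rest, i, inp =>
    if c = '(' then pvGoA offs ids rest (i + 1) true
    else if c = ')' then pvGoA offs ids rest (i + 1) false
    else if inp = false ∧ offs.contains i then
      -- index = link_offsets.index(i); return target_page_ids[index] (none exactly where Python raises IndexError)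
      PySem.List.pyGet? ids (((PySem.List.index? offs i).getD 0 : Nat) : Int)
    else pvGoA offs ids rest (i + 1) inp

def find_first_link_target (text : String) (link_offsets : List Int) (target_page_ids : List Int) : Option Int :=
  pvGoA link_offsets target_page_ids text.toList 0 false

-- ===== PORT B =====
-- text.rfind(t, 0, stop): index of the last occurrence of t in text[:stop], -1 if absent
-- (hand-written port, exact: scans left to right keeping the latest matching index)
def pvRfindAux : List Char → Char → Int → Int → Int
  | [], _, _, best => best
  | c :: rest, t, i, best => pvRfindAux rest t (i + 1) (if c = t then i else best)

def pvRfind (cs : List Char) (t : Char) (stop : Nat) : Int :=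
  pvRfindAux (cs.take stop) t 0 (-1)

-- the filter of Source B's list comprehension
def pvPredB (cs : List Char) (n : Int) (i : Int) : Bool :=
  0 ≤ i && i < n
    && !(PySem.List.pyGet? cs i == some '(') && !(PySem.List.pyGet? cs i == some ')')
    && decide (pvRfind cs '(' i.toNat ≤ pvRfind cs ')' i.toNat)

def find_first_link_target_alt (text : String) (link_offsets : List Int) (target_page_ids : List Int) : Option Int :=
  match (PySem.List.sorted (PySem.Set.ofList link_offsets) (fun x => x) false).filter
      (pvPredB text.toList (text.toList.length : Int)) with
  | q :: _ => PySem.List.pyGet? target_page_ids (((PySem.List.index? link_offsets q).getD 0 : Nat) : Int)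
  | [] => none

-- ===== PRECONDITION & SPEC =====
-- pvQual cs offs i: offset i is a link offset, in range, not a paren character, and the
-- last paren before position i is not an opening one (i.e. i is outside parentheses)
def pvQual (cs : List Char) (offs : List Int) (i : Int) : Bool :=
  offs.contains i && 0 ≤ i && i < (cs.length : Int)
    && !(cs[i.toNat]? == some '(') && !(cs[i.toNat]? == some ')')
    && !(((cs.take i.toNat).filter (fun c => c == '(' || c == ')')).getLast? == some '(')

-- Pre_ excludes exactly the inputs on which A raises IndexError (the leftmost qualifying link
-- offset sits at a position in link_offsets at or beyond len(target_page_ids)); B raises the same there.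
def Pre_find_first_link_target (text : String) (link_offsets : List Int) (target_page_ids : List Int) : Prop :=
  ∀ i ∈ link_offsets, pvQual text.toList link_offsets i = true →
    (∀ j ∈ link_offsets, pvQual text.toList link_offsets j = true → i ≤ j) →
    (PySem.List.index? link_offsets i).getD 0 < target_page_ids.length

instance (text : String) (link_offsets : List Int) (target_page_ids : List Int) : Decidable (Pre_find_first_link_target text link_offsets target_page_ids) := by unfold Pre_find_first_link_target; infer_instance

def pvWitness_find_first_link_target : String × List Int × List Int := ("a(b)c", [0, 2], [7, 8])

def Spec_find_first_link_target (text : String) (link_offsets : List Int) (target_page_ids : List Int) (out : Option Int) : Prop := out = find_first_link_target_alt text link_offsets target_page_ids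
instance (text : String) (link_offsets : List Int) (target_page_ids : List Int) (out : Option Int) : Decidable (Spec_find_first_link_target text link_offsets target_page_ids out) := by unfold Spec_find_first_link_target; infer_instance

-- ===== CLAIM (what is proved, stated in full; the proofs are below) =====
def Claim_equal_find_first_link_target : Prop := ∀ (text : String) (link_offsets : List Int) (target_page_ids : List Int), Dom_find_first_link_target text link_offsets target_page_ids → Pre_find_first_link_target text link_offsets target_page_ids → Spec_find_first_link_target text link_offsets target_page_ids (find_first_link_target text link_offsets target_page_ids)

-- ===== LEMMAS AND PROOFS =====

-- A's in_parens flag after scanning a prefix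
def pvState (p : List Char) : Bool :=
  p.foldl (fun s c => if c = '(' then true else if c = ')' then false else s) false

theorem pvGetLast?_cons {α : Type} (c : α) (l : List α) (h : l ≠ []) :
    (c :: l).getLast? = l.getLast? := by
  cases l with
  | nil => exact absurd rfl h
  | cons a t => simp [List.getLast?_cons_cons]

-- the flag is determined by the last paren of the scanned prefix
theorem pvState_foldl_eq (p : List Char) (s : Bool) :
    p.foldl (fun s c => if c = '(' then true else if c = ')' then false else s) s
      = if (p.filter (fun c => c == '(' || c == ')')) = [] then s
        else ((p.filter (fun c => c == '(' || c == ')')).getLast? == some '(') := by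
  induction p generalizing s with
  | nil => simp
  | cons c rest ih =>
    by_cases h1 : c = '('
    · subst h1
      simp only [List.foldl_cons, List.filter_cons,
        show (('(' == '(' || '(' == ')')) = true from by decide]
      rw [ih]
      simp only [if_true]
      by_cases h : (rest.filter (fun c => c == '(' || c == ')')) = []
      · simp [h]
      · rw [pvGetLast?_cons _ _ h]
        simp [h]
    · by_cases h2 : c = ')'
      · subst h2
        simp only [List.foldl_cons, if_neg (show ¬(')' = '(') from by decide),
          List.filter_cons, show ((')' == '(' || ')' == ')')) = true from by decide]
        rw [ih]
        simp only [if_true]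
        by_cases h : (rest.filter (fun c => c == '(' || c == ')')) = []
        · simp [h]
        · rw [pvGetLast?_cons _ _ h]
          simp [h]
      · have hf : (c == '(' || c == ')') = false := by simp [h1, h2]
        simp only [List.foldl_cons, if_neg h1, if_neg h2, List.filter_cons, hf,
          Bool.false_eq_true, if_false]
        exact ih s

theorem pvState_eq_lastParen (p : List Char) :
    pvState p = ((p.filter (fun c => c == '(' || c == ')')).getLast? == some '(') := by
  rw [pvState, pvState_foldl_eq]
  by_cases h : (p.filter (fun c => c == '(' || c == ')')) = []
  · simp [h]
  · simp [h]

theorem pvState_append_singleton (p : List Char) (c : Char) :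
    pvState (p ++ [c]) = if c = '(' then true else if c = ')' then false else pvState p := by
  simp [pvState, List.foldl_append]

-- Source B's rfind comparison computes the negation of A's flag
theorem pvRfind_scan (p : List Char) (i a b : Int) (ha : a < i) (hb : b < i) :
    p.foldl (fun s c => if c = '(' then true else if c = ')' then false else s) (decide (b < a))
      = decide (pvRfindAux p ')' i b < pvRfindAux p '(' i a) := by
  induction p generalizing i a b with
  | nil => simp [pvRfindAux]
  | cons c rest ih =>
    by_cases h1 : c = '('
    · subst h1
      have h' := ih (i + 1) i b (by omega) (by omega)
      rw [show (decide (b < i)) = true from by simp [hb]] at h'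
      simp only [List.foldl_cons, pvRfindAux,
        if_neg (show ¬('(' = ')') from by decide)]
      exact h'
    · by_cases h2 : c = ')'
      · subst h2
        have h' := ih (i + 1) a i (by omega) (by omega)
        rw [show (decide (i < a)) = false from by simp; omega] at h'
        simp only [List.foldl_cons, pvRfindAux,
          if_neg (show ¬(')' = '(') from by decide)]
        exact h'
      · have h' := ih (i + 1) a b (by omega) (by omega)
        simp only [List.foldl_cons, pvRfindAux, if_neg h1, if_neg h2]
        exact h'

theorem pvRfind_le_iff_state (cs : List Char) (k : Nat) :
    decide (pvRfind cs '(' k ≤ pvRfind cs ')' k) = !pvState (cs.take k) := by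
  have h := pvRfind_scan (cs.take k) 0 (-1) (-1) (by omega) (by omega)
  simp only [show (decide ((-1 : Int) < -1)) = false from by decide] at h
  unfold pvState pvRfind
  rw [h]
  by_cases hlt : pvRfindAux (cs.take k) ')' 0 (-1) < pvRfindAux (cs.take k) '(' 0 (-1)
  · simp [hlt, not_le.mpr hlt]
  · simp [hlt, not_lt.mp hlt]

-- characterisation of A's scan: the leftmost qualifying index wins
theorem pvGoA_char (offs ids : List Int) (cs : List Char) :
    ∀ suf pre, cs = pre ++ suf →
    pvGoA offs ids suf (pre.length : Int) (pvState pre)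
      = match (List.range' pre.length suf.length).find? (fun k : Nat => pvQual cs offs (k : Int)) with
        | some k => PySem.List.pyGet? ids (((PySem.List.index? offs (k : Int)).getD 0 : Nat) : Int)
        | none => none := by
  intro suf
  induction suf with
  | nil => intro pre hcs; simp [pvGoA]
  | cons c rest ih =>
    intro pre hcs
    have hm : ((pre.length : Int)).toNat = pre.length := Int.toNat_natCast _
    have hget : cs[pre.length]? = some c := by
      subst hcs; simp
    have htake : cs.take pre.length = pre := by
      subst hcs; exact List.take_left
    have hb1 : (0 : Int) ≤ (pre.length : Int) := by positivity
    have hb2 : ((pre.length : Int)) < (cs.length : Int) := by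
      subst hcs; simp
    have hrange : List.range' pre.length (c :: rest).length
        = pre.length :: List.range' (pre.length + 1) rest.length := by
      simp [List.range'_succ]
    have hcs' : cs = (pre ++ [c]) ++ rest := by simp [hcs]
    by_cases h1 : c = '('
    · subst h1
      have hq : pvQual cs offs ((pre.length : Int)) = false := by
        simp [pvQual, hm, hget]
      have hstate : pvState (pre ++ ['(']) = true := by simp [pvState_append_singleton]
      have hIH := ih (pre ++ ['(']) hcs'
      rw [show ((pre ++ ['(']).length) = pre.length + 1 from by simp, hstate] at hIH
      have e1 : pvGoA offs ids ('(' :: rest) (pre.length : Int) (pvState pre)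
          = pvGoA offs ids rest ((pre.length : Int) + 1) true := by
        simp only [pvGoA, if_true]
      rw [e1, hrange, List.find?_cons_of_neg (by simp [hq])]
      rw [show ((pre.length : Int) + 1) = (((pre.length + 1 : Nat)) : Int) from by push_cast; ring]
      exact hIH
    · by_cases h2 : c = ')'
      · subst h2
        have hq : pvQual cs offs ((pre.length : Int)) = false := by
          simp [pvQual, hm, hget]
        have hstate : pvState (pre ++ [')']) = false := by simp [pvState_append_singleton]
        have hIH := ih (pre ++ [')']) hcs'
        rw [show ((pre ++ [')']).length) = pre.length + 1 from by simp, hstate] at hIH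
        have e1 : pvGoA offs ids (')' :: rest) (pre.length : Int) (pvState pre)
            = pvGoA offs ids rest ((pre.length : Int) + 1) false := by
          simp only [pvGoA, if_neg (show ¬(')' = '(') from by decide), if_true]
        rw [e1, hrange, List.find?_cons_of_neg (by simp [hq])]
        rw [show ((pre.length : Int) + 1) = (((pre.length + 1 : Nat)) : Int) from by push_cast; ring]
        exact hIH
      · have hstate' : pvState (pre ++ [c]) = pvState pre := by
          simp [pvState_append_singleton, h1, h2]
        have hnotp1 : (cs[pre.length]? == some '(') = false := by
          simp [hget]; exact fun h => h1 h
        have hnotp2 : (cs[pre.length]? == some ')') = false := by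
          simp [hget]; exact fun h => h2 h
        have hql : pvQual cs offs ((pre.length : Int))
            = (offs.contains ((pre.length : Int)) && !pvState pre) := by
          rw [pvQual, hm, hnotp1, hnotp2, htake, ← pvState_eq_lastParen]
          simp [hb1, hb2]
        by_cases hif : pvState pre = false ∧ offs.contains ((pre.length : Int)) = true
        · have hq : pvQual cs offs ((pre.length : Int)) = true := by
            rw [hql, hif.1, hif.2]; rfl
          have e1 : pvGoA offs ids (c :: rest) (pre.length : Int) (pvState pre)
              = PySem.List.pyGet? ids (((PySem.List.index? offs ((pre.length : Int))).getD 0 : Nat) : Int) := by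
            simp only [pvGoA, if_neg h1, if_neg h2]
            rw [if_pos hif]
          rw [e1, hrange, List.find?_cons_of_pos (by simp [hq])]
        · have hq : pvQual cs offs ((pre.length : Int)) = false := by
            rw [hql]
            rcases Bool.eq_false_or_eq_true (pvState pre) with hs | hs
            · rw [hs]; simp
            · have hc : offs.contains ((pre.length : Int)) = false := by
                by_contra hcc
                exact hif ⟨hs, by simpa using hcc⟩
              rw [hc]; rfl
          have hIH := ih (pre ++ [c]) hcs'
          rw [show ((pre ++ [c]).length) = pre.length + 1 from by simp, hstate'] at hIH
          have e1 : pvGoA offs ids (c :: rest) (pre.length : Int) (pvState pre)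
              = pvGoA offs ids rest ((pre.length : Int) + 1) (pvState pre) := by
            simp only [pvGoA, if_neg h1, if_neg h2]
            rw [if_neg hif]
          rw [e1, hrange, List.find?_cons_of_neg (by simp [hq])]
          rw [show ((pre.length : Int) + 1) = (((pre.length + 1 : Nat)) : Int) from by push_cast; ring]
          exact hIH

-- Source B's filter agrees with pvQual on the members of link_offsets
theorem pvPredB_eq_pvQual (cs : List Char) (offs : List Int) (i : Int) (hmem : i ∈ offs) :
    pvPredB cs (cs.length : Int) i = pvQual cs offs i := by
  have hc : offs.contains i = true := by simpa using hmem
  by_cases h0 : (0 : Int) ≤ i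
  · by_cases hn : i < (cs.length : Int)
    · have hg : PySem.List.pyGet? cs i = cs[i.toNat]? :=
        PySem.List.pyGet?_of_nonneg (xs := cs) (i := i) h0
      rw [pvPredB, pvQual, hc, hg, pvRfind_le_iff_state cs i.toNat, ← pvState_eq_lastParen]
      simp [h0, hn]
    · simp [pvPredB, pvQual, hn]
  · simp [pvPredB, pvQual, h0]

-- find? over a strictly increasing list returns the minimum satisfying element
theorem find?_pairwise_min {α : Type} [LinearOrder α] (l : List α) (p : α → Bool) (k : α)
    (hp : l.Pairwise (· < ·)) (h : l.find? p = some k) :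
    ∀ j ∈ l, p j = true → k ≤ j := by
  induction l with
  | nil => simp at h
  | cons a t ih =>
    rcases List.pairwise_cons.mp hp with ⟨ha, ht⟩
    by_cases hpa : p a = true
    · rw [List.find?_cons_of_pos hpa] at h
      cases h
      intro j hj _
      rcases List.mem_cons.mp hj with rfl | hjt
      · exact le_refl _
      · exact le_of_lt (ha j hjt)
    · rw [List.find?_cons_of_neg (by simpa using hpa)] at h
      intro j hj hpj
      rcases List.mem_cons.mp hj with rfl | hjt
      · exact absurd hpj hpa
      · exact ih ht h j hjt hpj

-- ===== VERDICT (by name: the statement is the Claim_ definition above) =====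
theorem find_first_link_target_spec : Claim_equal_find_first_link_target := by
  intro text offs ids _ _
  unfold Spec_find_first_link_target
  set cs := text.toList with hcs
  have hA : find_first_link_target text offs ids
      = match (List.range' 0 cs.length).find? (fun k : Nat => pvQual cs offs (k : Int)) with
        | some k => PySem.List.pyGet? ids (((PySem.List.index? offs (k : Int)).getD 0 : Nat) : Int)
        | none => none := by
    have := pvGoA_char offs ids cs cs [] (by simp)
    simpa [find_first_link_target, pvState] using this
  have hSmem : ∀ x, x ∈ (PySem.List.sorted (PySem.Set.ofList offs) (fun x => x) false).filter
      (pvPredB cs (cs.length : Int)) ↔ (x ∈ offs ∧ pvQual cs offs x = true) := by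
    intro x
    rw [List.mem_filter, PySem.List.mem_sorted, PySem.Set.mem_ofList]
    constructor
    · rintro ⟨hx, hpx⟩; exact ⟨hx, by rw [← pvPredB_eq_pvQual cs offs x hx]; exact hpx⟩
    · rintro ⟨hx, hqx⟩; exact ⟨hx, by rw [pvPredB_eq_pvQual cs offs x hx]; exact hqx⟩
  have hSpair : ((PySem.List.sorted (PySem.Set.ofList offs) (fun x => x) false).filter
      (pvPredB cs (cs.length : Int))).Pairwise (· < ·) :=
    (PySem.List.sorted_ofList_pairwise_lt offs).filter _
  rw [hA]
  unfold find_first_link_target_alt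
  cases hfind : (List.range' 0 cs.length).find? (fun k : Nat => pvQual cs offs (k : Int)) with
  | some k =>
    have hqk : pvQual cs offs (k : Int) = true := by
      have := List.find?_some hfind; simpa using this
    have hkmem : (k : Int) ∈ offs := by
      have := hqk; unfold pvQual at this
      simp only [Bool.and_eq_true] at this
      simpa using this.1.1.1.1.1
    have hkS : (k : Int) ∈ (PySem.List.sorted (PySem.Set.ofList offs) (fun x => x) false).filter
        (pvPredB cs (cs.length : Int)) := (hSmem _).mpr ⟨hkmem, hqk⟩
    cases hS : (PySem.List.sorted (PySem.Set.ofList offs) (fun x => x) false).filter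
        (pvPredB cs (cs.length : Int)) with
    | nil => rw [hS] at hkS; simp at hkS
    | cons h t =>
      -- the head h of the strictly increasing filtered list equals k
      have hhS : h ∈ (PySem.List.sorted (PySem.Set.ofList offs) (fun x => x) false).filter
          (pvPredB cs (cs.length : Int)) := by rw [hS]; exact List.mem_cons_self
      rcases (hSmem h).mp hhS with ⟨hhmem, hhq⟩
      have hbounds : (0 : Int) ≤ h ∧ h < (cs.length : Int) := by
        unfold pvQual at hhq
        simp only [Bool.and_eq_true, decide_eq_true_eq] at hhq
        exact ⟨hhq.1.1.1.1.2, hhq.1.1.1.2⟩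
      have hhq' : pvQual cs offs ((h.toNat : Nat) : Int) = true := by
        rwa [Int.toNat_of_nonneg hbounds.1]
      have hhrange : h.toNat ∈ List.range' 0 cs.length := by
        simp [List.mem_range'_1]; omega
      have hkle : k ≤ h.toNat :=
        find?_pairwise_min _ _ _ (by simpa using List.pairwise_lt_range') hfind h.toNat hhrange hhq'
      have hkleh : (k : Int) ≤ h := by
        rw [← Int.toNat_of_nonneg hbounds.1]; exact_mod_cast hkle
      have hhlek : h ≤ (k : Int) := by
        rw [hS] at hkS
        rcases List.mem_cons.mp hkS with rfl | hkt
        · exact le_refl _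
        · rw [hS] at hSpair
          exact le_of_lt ((List.pairwise_cons.mp hSpair).1 _ hkt)
      have : h = (k : Int) := le_antisymm hhlek hkleh
      rw [this]
  | none =>
    have hnone : ∀ j ∈ List.range' 0 cs.length, ¬ (pvQual cs offs (j : Int) = true) := by
      intro j hj
      have := List.find?_eq_none.mp hfind j hj
      simpa using this
    cases hS : (PySem.List.sorted (PySem.Set.ofList offs) (fun x => x) false).filter
        (pvPredB cs (cs.length : Int)) with
    | nil => rfl
    | cons h t =>
      exfalso
      have hhS : h ∈ (PySem.List.sorted (PySem.Set.ofList offs) (fun x => x) false).filter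
          (pvPredB cs (cs.length : Int)) := by rw [hS]; exact List.mem_cons_self
      rcases (hSmem h).mp hhS with ⟨hhmem, hhq⟩
      have hbounds : (0 : Int) ≤ h ∧ h < (cs.length : Int) := by
        unfold pvQual at hhq
        simp only [Bool.and_eq_true, decide_eq_true_eq] at hhq
        exact ⟨hhq.1.1.1.1.2, hhq.1.1.1.2⟩
      have hhq' : pvQual cs offs ((h.toNat : Nat) : Int) = true := by
        rwa [Int.toNat_of_nonneg hbounds.1]
      exact hnone h.toNat (by simp [List.mem_range'_1]; omega) hhq'
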